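-- pv_equiv track=rewrite | github.com/WallerTsai/OJ-Solution | leetcode-py/动态规划/其他线性DP/多维DP/No3725.py | countCoprime
-- ===== SOURCE A (Python) =====
-- from functools import cache
-- from math import gcd
-- from typing import List
--
-- def countCoprime(mat: List[List[int]]) -> int:
--     MOD = 1_000_000_007
--
--     @cache  # 缓存装饰器，避免重复计算 dfs（一行代码实现记忆化）
--     def dfs(i: int, g: int) -> int:
--         if i < 0:
--             return 1 if g == 1 else 0
--         return sum(dfs(i - 1, gcd(g, x)) for x in mat[i]) % MOD
--
--     return dfs(len(mat) - 1, 0)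
-- ===== SOURCE B (Python) =====
-- from math import gcd
-- from typing import List
--
-- def countCoprime(mat: List[List[int]]) -> int:
--     MOD = 1_000_000_007
--     d = {0: 1}
--     for row in mat:
--         nd = {}
--         for g, c in d.items():
--             for x in row:
--                 k = gcd(g, x)
--                 nd[k] = (nd.get(k, 0) + c) % MOD
--         d = nd
--     return d.get(1, 0) % MOD
-- ===== Notes on version B (the rewrite author's own statement) =====
-- stated objective: alternative
-- what changed: Replaces the top-down @cache-memoized recursion dfs(i, g) with a bottom-up iterative DP that folds over the rows maintaining a dict from accumulated gcd values to their way-counts mod 1e9+7, reading the count at key 1 at the end.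
import Mathlib
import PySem

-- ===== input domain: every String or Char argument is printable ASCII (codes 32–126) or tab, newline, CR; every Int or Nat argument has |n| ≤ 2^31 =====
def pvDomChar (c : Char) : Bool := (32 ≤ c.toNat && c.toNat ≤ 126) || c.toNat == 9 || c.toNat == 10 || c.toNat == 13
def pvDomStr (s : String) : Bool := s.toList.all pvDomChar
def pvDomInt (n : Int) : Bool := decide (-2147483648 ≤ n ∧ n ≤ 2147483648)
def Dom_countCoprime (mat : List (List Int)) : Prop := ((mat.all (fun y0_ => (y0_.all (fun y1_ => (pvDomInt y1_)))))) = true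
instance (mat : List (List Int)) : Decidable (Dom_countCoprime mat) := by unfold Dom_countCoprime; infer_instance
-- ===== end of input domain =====

-- B replaces A's top-down memoized recursion over (row index, gcd) with a bottom-up
-- iterative DP over a dict of accumulated-gcd counts (objective: alternative decomposition).


-- ===== PORT A =====
-- dfs(i, g) of A, with fuel n = i + 1 (n = 0 is Python's i < 0).  The index n into mat is
-- always in range on reachable calls, so mat[i] is ported as pyGetD with default [].
-- A's @cache only memoizes; it does not change the computed value, so the port is the bare recursion.
def pvDfsA (mat : List (List Int)) : Nat → Int → Int
  | 0, g => if g = 1 then 1 else 0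
  | n + 1, g =>
      PySem.Int.mod
        ((PySem.List.pyGetD mat (n : Int) []).foldl
          (fun acc x => acc + pvDfsA mat n (Int.gcd g x)) 0)
        1000000007

def countCoprime (mat : List (List Int)) : Int := pvDfsA mat mat.length 0

-- ===== PORT B =====
def countCoprime_alt (mat : List (List Int)) : Int :=
  let d := mat.foldl
    (fun d row =>
      d.items.foldl
        (fun nd p =>
          row.foldl
            (fun nd x =>
              let k : Int := Int.gcd p.1 x
              nd.insert k (PySem.Int.mod (nd.getD k 0 + p.2) 1000000007))
            nd)
        PySem.Dict.empty)
    (PySem.Dict.ofList [((0 : Int), (1 : Int))])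
  PySem.Int.mod (d.getD 1 0) 1000000007

-- ===== PRECONDITION & SPEC =====
def Spec_countCoprime (mat : List (List Int)) (out : Int) : Prop := out = countCoprime_alt mat
instance (mat : List (List Int)) (out : Int) : Decidable (Spec_countCoprime mat out) := by unfold Spec_countCoprime; infer_instance

-- ===== CLAIM (what is proved, stated in full; the proofs are below) =====
def Claim_equal_countCoprime : Prop := ∀ (mat : List (List Int)), Dom_countCoprime mat → Spec_countCoprime mat (countCoprime mat)

-- ===== LEMMAS AND PROOFS =====

-- Exact (un-reduced) count: pvE rows g = number of ways to pick one element per row of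
-- rows so that the gcd of g with all picks equals 1.
def pvE : List (List Int) → Int → Int
  | [], g => if g = 1 then 1 else 0
  | r :: rs, g => (r.map (fun x => pvE rs (Int.gcd g x))).sum

lemma pvMod_eq (a : Int) : PySem.Int.mod a 1000000007 = a % 1000000007 :=
  PySem.Int.mod_eq_emod_of_pos (by norm_num)

lemma pvSum_map_emod (l : List Int) (f : Int → Int) :
    (l.map (fun x => f x % 1000000007)).sum % 1000000007 = (l.map f).sum % 1000000007 := by
  induction l with
  | nil => rfl
  | cons a l ih =>
      simp only [List.map_cons, List.sum_cons]
      rw [Int.add_emod, Int.emod_emod_of_dvd _ dvd_rfl, ih, ← Int.add_emod]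

lemma pvDfsA_eq (mat : List (List Int)) :
    ∀ (n : Nat), n ≤ mat.length → ∀ g : Int,
      pvDfsA mat n g = pvE ((mat.take n).reverse) g % 1000000007 := by
  intro n
  induction n with
  | zero =>
      intro _ g
      simp only [pvDfsA, List.take_zero, List.reverse_nil, pvE]
      split_ifs <;> norm_num
  | succ n ih =>
      intro hn g
      have hlt : n < mat.length := by omega
      have hrow : PySem.List.pyGetD mat (n : Int) ([] : List Int) = mat[n] := by
        rw [PySem.List.pyGetD_natCast, List.getD_eq_getElem mat [] hlt]
      have htake : (mat.take (n + 1)).reverse = mat[n] :: (mat.take n).reverse := by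
        rw [List.take_add_one, List.getElem?_eq_getElem hlt]
        simp
      rw [pvDfsA, pvMod_eq, hrow, PySem.List.foldl_add, zero_add, htake]
      show (List.map (fun x => pvDfsA mat n (Int.gcd g x)) mat[n]).sum % 1000000007
          = pvE (mat[n] :: (mat.take n).reverse) g % 1000000007
      simp only [ih (by omega), pvE]
      exact pvSum_map_emod mat[n] (fun x => pvE ((mat.take n).reverse) (Int.gcd g x))

lemma pvCountCoprime_eq (mat : List (List Int)) :
    countCoprime mat = pvE mat.reverse 0 % 1000000007 := by
  have h := pvDfsA_eq mat mat.length le_rfl 0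
  rwa [List.take_length] at h

lemma pvSum_map_comm (l1 l2 : List Int) (f : Int → Int → Int) :
    (l1.map (fun a => (l2.map (fun b => f a b)).sum)).sum
      = (l2.map (fun b => (l1.map (fun a => f a b)).sum)).sum := by
  induction l1 with
  | nil => simp
  | cons a l ih =>
      simp only [List.map_cons, List.sum_cons, ih, ← PySem.List.sum_map_add_int]

lemma pvGcd_swap (g y x : Int) :
    (Int.gcd (↑(Int.gcd g y)) x : Nat) = Int.gcd (↑(Int.gcd g x)) y := by
  rw [Int.gcd_assoc, Int.gcd_assoc, Int.gcd_comm y x]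

lemma pvE_append_singleton (rs : List (List Int)) (r : List Int) :
    ∀ g, pvE (rs ++ [r]) g = pvE (r :: rs) g := by
  induction rs with
  | nil => intro g; rfl
  | cons r' rs ih =>
      intro g
      show pvE (r' :: (rs ++ [r])) g = pvE (r :: r' :: rs) g
      simp only [pvE, ih]
      rw [pvSum_map_comm r' r (fun y x => pvE rs (Int.gcd (↑(Int.gcd g y)) x))]
      simp only [pvGcd_swap]

lemma pvE_reverse (rs : List (List Int)) : ∀ g, pvE rs.reverse g = pvE rs g := by
  induction rs with
  | nil => intro _; rfl
  | cons r rs ih =>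
      intro g
      rw [List.reverse_cons, pvE_append_singleton]
      simp only [pvE, ih]

-- Weighted sum of a dict's entries: Σ over keys j of f j * d[j].
def pvS (d : PySem.Dict Int Int) (f : Int → Int) : Int :=
  (d.keys.map (fun j => f j * d.getD j 0)).sum

lemma pvSum_update (l : List Int) (hnd : l.Nodup) (k : Int) (hk : k ∈ l)
    (g1 g2 : Int → Int) (hoff : ∀ j ∈ l, j ≠ k → g1 j = g2 j) :
    (l.map g1).sum = (l.map g2).sum - g2 k + g1 k := by
  induction l with
  | nil => cases hk
  | cons a l ih =>
      obtain ⟨ha, hl⟩ := List.nodup_cons.mp hnd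
      simp only [List.map_cons, List.sum_cons]
      rcases List.mem_cons.mp hk with rfl | hkl
      · have hmap : l.map g1 = l.map g2 := by
          apply List.map_congr_left
          intro j hj
          exact hoff j (List.mem_cons_of_mem _ hj) (fun h => ha (h ▸ hj))
        rw [hmap]; ring
      · have hak : a ≠ k := fun h => ha (h ▸ hkl)
        rw [hoff a (List.mem_cons_self ..) hak,
          ih hl hkl (fun j hj hjk => hoff j (List.mem_cons_of_mem _ hj) hjk)]
        ring

lemma pvSum_indicator (l : List Int) (hnd : l.Nodup) (h : Int → Int) :
    (l.map (fun j => (if j = 1 then 1 else 0) * h j)).sum = if 1 ∈ l then h 1 else 0 := by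
  induction l with
  | nil => simp
  | cons a l ih =>
      obtain ⟨ha, hl⟩ := List.nodup_cons.mp hnd
      simp only [List.map_cons, List.sum_cons, ih hl, List.mem_cons]
      by_cases hak : a = 1
      · subst hak
        simp [ha]
      · simp [hak, Ne.symm hak]

lemma pvS_insert (d : PySem.Dict Int Int) (hnd : d.keys.Nodup) (k v : Int) (f : Int → Int) :
    pvS (d.insert k v) f = pvS d f + f k * (v - d.getD k 0) := by
  by_cases hc : d.contains k = true
  · have hkeys := PySem.Dict.keys_insert_of_contains d v hc
    have hk : k ∈ d.keys := (PySem.Dict.contains_iff_mem_keys d k).mp hc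
    unfold pvS
    rw [hkeys, pvSum_update d.keys hnd k hk
      (fun j => f j * (d.insert k v).getD j 0) (fun j => f j * d.getD j 0)
      (fun j _ hjk => by
        show f j * (d.insert k v).getD j 0 = f j * d.getD j 0
        rw [PySem.Dict.getD_insert_of_ne d v 0 hjk])]
    show (List.map (fun j => f j * d.getD j 0) d.keys).sum - f k * d.getD k 0
        + f k * (d.insert k v).getD k 0
      = (List.map (fun j => f j * d.getD j 0) d.keys).sum + f k * (v - d.getD k 0)
    rw [PySem.Dict.getD_insert_self]
    ring
  · have hc' : d.contains k = false := by simpa using hc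
    have hknot : k ∉ d.keys := fun h =>
      hc ((PySem.Dict.contains_iff_mem_keys d k).mpr h)
    unfold pvS
    rw [PySem.Dict.keys_insert_of_not_contains d v hc', List.map_append, List.sum_append]
    have h1 : d.keys.map (fun j => f j * (d.insert k v).getD j 0)
        = d.keys.map (fun j => f j * d.getD j 0) := by
      apply List.map_congr_left
      intro j hj
      have hjk : j ≠ k := fun h => hknot (h ▸ hj)
      rw [PySem.Dict.getD_insert_of_ne d v 0 hjk]
    rw [h1, PySem.Dict.getD_of_not_contains d 0 hc']
    simp only [List.map_cons, List.map_nil, List.sum_cons, List.sum_nil,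
      PySem.Dict.getD_insert_self]
    ring

-- B's innermost loop: for x in row: nd[gcd(g,x)] = (nd.get(gcd(g,x),0) + c) % MOD
lemma pvInner_nodup (row : List Int) (g c : Int) (nd : PySem.Dict Int Int)
    (h : nd.keys.Nodup) :
    (row.foldl (fun nd x =>
        nd.insert ((Int.gcd g x : Int))
          (PySem.Int.mod (nd.getD ((Int.gcd g x : Int)) 0 + c) 1000000007)) nd).keys.Nodup :=
  PySem.Dict.nodup_keys_foldl_insert_key row (fun x => ((Int.gcd g x : Int)))
    (fun nd x => PySem.Int.mod (nd.getD ((Int.gcd g x : Int)) 0 + c) 1000000007) nd h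

lemma pvInner_modeq (row : List Int) (g c : Int) (f : Int → Int) :
    ∀ nd : PySem.Dict Int Int, nd.keys.Nodup →
      pvS (row.foldl (fun nd x =>
          nd.insert ((Int.gcd g x : Int))
            (PySem.Int.mod (nd.getD ((Int.gcd g x : Int)) 0 + c) 1000000007)) nd) f
        ≡ pvS nd f + (row.map (fun x => f ((Int.gcd g x : Int)))).sum * c [ZMOD 1000000007] := by
  induction row with
  | nil =>
      intro nd h
      simp only [List.foldl_nil, List.map_nil, List.sum_nil, zero_mul, add_zero]
      exact Int.ModEq.refl _
  | cons x row ih =>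
      intro nd h
      simp only [List.foldl_cons, List.map_cons, List.sum_cons]
      have h1 := ih (nd.insert ((Int.gcd g x : Int))
          (PySem.Int.mod (nd.getD ((Int.gcd g x : Int)) 0 + c) 1000000007))
        (PySem.Dict.nodup_keys_insert _ _ _ h)
      have hm : ((nd.getD ((Int.gcd g x : Int)) 0 + c) % 1000000007
            - nd.getD ((Int.gcd g x : Int)) 0) ≡ c [ZMOD 1000000007] := by
        have hmm : (nd.getD ((Int.gcd g x : Int)) 0 + c) % 1000000007
            ≡ nd.getD ((Int.gcd g x : Int)) 0 + c [ZMOD 1000000007] :=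
          Int.emod_emod_of_dvd _ dvd_rfl
        simpa using hmm.sub_right (nd.getD ((Int.gcd g x : Int)) 0)
      calc pvS (row.foldl (fun nd x =>
              nd.insert ((Int.gcd g x : Int))
                (PySem.Int.mod (nd.getD ((Int.gcd g x : Int)) 0 + c) 1000000007))
            (nd.insert ((Int.gcd g x : Int))
              (PySem.Int.mod (nd.getD ((Int.gcd g x : Int)) 0 + c) 1000000007))) f
          ≡ pvS (nd.insert ((Int.gcd g x : Int))
              (PySem.Int.mod (nd.getD ((Int.gcd g x : Int)) 0 + c) 1000000007)) f
            + (row.map (fun x => f ((Int.gcd g x : Int)))).sum * c [ZMOD 1000000007] := h1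
        _ = pvS nd f
            + f ((Int.gcd g x : Int)) * ((nd.getD ((Int.gcd g x : Int)) 0 + c) % 1000000007
                - nd.getD ((Int.gcd g x : Int)) 0)
            + (row.map (fun x => f ((Int.gcd g x : Int)))).sum * c := by
              rw [pvS_insert nd h, pvMod_eq]
        _ ≡ pvS nd f + f ((Int.gcd g x : Int)) * c
            + (row.map (fun x => f ((Int.gcd g x : Int)))).sum * c [ZMOD 1000000007] :=
              ((hm.mul_left (f ((Int.gcd g x : Int)))).add_left (pvS nd f)).add_right _
        _ = pvS nd f + (f ((Int.gcd g x : Int))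
            + (row.map (fun x => f ((Int.gcd g x : Int)))).sum) * c := by ring

-- B's middle loop: for (g, c) in d.items(): <inner loop>
lemma pvMid_nodup (row : List Int) (l : List (Int × Int)) :
    ∀ nd : PySem.Dict Int Int, nd.keys.Nodup →
      (l.foldl (fun nd p =>
          row.foldl (fun nd x =>
            nd.insert ((Int.gcd p.1 x : Int))
              (PySem.Int.mod (nd.getD ((Int.gcd p.1 x : Int)) 0 + p.2) 1000000007)) nd)
        nd).keys.Nodup := by
  induction l with
  | nil => intro nd h; exact h
  | cons p l ih => intro nd h; exact ih _ (pvInner_nodup row p.1 p.2 nd h)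

lemma pvMid_modeq (row : List Int) (l : List (Int × Int)) (f : Int → Int) :
    ∀ nd : PySem.Dict Int Int, nd.keys.Nodup →
      pvS (l.foldl (fun nd p =>
          row.foldl (fun nd x =>
            nd.insert ((Int.gcd p.1 x : Int))
              (PySem.Int.mod (nd.getD ((Int.gcd p.1 x : Int)) 0 + p.2) 1000000007)) nd)
        nd) f
        ≡ pvS nd f
          + (l.map (fun p => (row.map (fun x => f ((Int.gcd p.1 x : Int)))).sum * p.2)).sum
          [ZMOD 1000000007] := by
  induction l with
  | nil =>
      intro nd h
      simp only [List.foldl_nil, List.map_nil, List.sum_nil, add_zero]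
      exact Int.ModEq.refl _
  | cons p l ih =>
      intro nd h
      simp only [List.foldl_cons, List.map_cons, List.sum_cons]
      have h2 := ih _ (pvInner_nodup row p.1 p.2 nd h)
      have h1 := (pvInner_modeq row p.1 p.2 f nd h).add_right
        ((l.map (fun p => (row.map (fun x => f ((Int.gcd p.1 x : Int)))).sum * p.2)).sum)
      have h3 := h2.trans h1
      calc pvS _ f
          ≡ pvS nd f + (row.map (fun x => f ((Int.gcd p.1 x : Int)))).sum * p.2
            + (l.map (fun p => (row.map (fun x => f ((Int.gcd p.1 x : Int)))).sum * p.2)).sum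
            [ZMOD 1000000007] := h3
        _ = pvS nd f + ((row.map (fun x => f ((Int.gcd p.1 x : Int)))).sum * p.2
            + (l.map (fun p => (row.map (fun x => f ((Int.gcd p.1 x : Int)))).sum * p.2)).sum) := by
              ring

-- B's outer loop: for row in mat: d = <fresh dict built by the two inner loops>
lemma pvOuter_nodup (mats : List (List Int)) :
    ∀ d : PySem.Dict Int Int, d.keys.Nodup →
      (mats.foldl (fun d row =>
          d.items.foldl (fun nd p =>
            row.foldl (fun nd x =>
              nd.insert ((Int.gcd p.1 x : Int))
                (PySem.Int.mod (nd.getD ((Int.gcd p.1 x : Int)) 0 + p.2) 1000000007)) nd)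
          PySem.Dict.empty) d).keys.Nodup := by
  induction mats with
  | nil => intro d h; exact h
  | cons row mats ih =>
      intro d h
      simp only [List.foldl_cons]
      exact ih _ (pvMid_nodup row d.items PySem.Dict.empty (PySem.Dict.nodup_keys_empty))

lemma pvOuter_modeq (mats : List (List Int)) :
    ∀ d : PySem.Dict Int Int, d.keys.Nodup →
      pvS (mats.foldl (fun d row =>
          d.items.foldl (fun nd p =>
            row.foldl (fun nd x =>
              nd.insert ((Int.gcd p.1 x : Int))
                (PySem.Int.mod (nd.getD ((Int.gcd p.1 x : Int)) 0 + p.2) 1000000007)) nd)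
          PySem.Dict.empty) d) (pvE [])
        ≡ pvS d (pvE mats) [ZMOD 1000000007] := by
  induction mats with
  | nil => intro d h; exact Int.ModEq.refl _
  | cons row mats ih =>
      intro d h
      simp only [List.foldl_cons]
      have hd' := pvMid_nodup row d.items PySem.Dict.empty (PySem.Dict.nodup_keys_empty)
      have h1 := ih _ hd'
      have h2 := pvMid_modeq row d.items (pvE mats) PySem.Dict.empty
        (PySem.Dict.nodup_keys_empty)
      have hempty : pvS (PySem.Dict.empty : PySem.Dict Int Int) (pvE mats) = 0 := rfl
      have hitems : (d.items.map
            (fun p => (row.map (fun x => pvE mats ((Int.gcd p.1 x : Int)))).sum * p.2)).sum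
          = pvS d (pvE (row :: mats)) := by
        rw [PySem.Dict.items_eq_map_keys d h (0 : Int), List.map_map]
        unfold pvS
        congr 1
      rw [hempty, zero_add, hitems] at h2
      exact h1.trans h2

lemma pvAlt_eq (mat : List (List Int)) :
    countCoprime_alt mat = pvE mat 0 % 1000000007 := by
  show PySem.Int.mod
      ((mat.foldl (fun d row =>
          d.items.foldl (fun nd p =>
            row.foldl (fun nd x =>
              nd.insert ((Int.gcd p.1 x : Int))
                (PySem.Int.mod (nd.getD ((Int.gcd p.1 x : Int)) 0 + p.2) 1000000007)) nd)
          PySem.Dict.empty)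
        (PySem.Dict.ofList [((0 : Int), (1 : Int))])).getD 1 0)
      1000000007
    = pvE mat 0 % 1000000007
  have h0 : (PySem.Dict.ofList [((0 : Int), (1 : Int))]).keys.Nodup :=
    PySem.Dict.nodup_keys_ofList _
  have hnd := pvOuter_nodup mat _ h0
  have hmod := pvOuter_modeq mat _ h0
  set final := mat.foldl (fun d row =>
      d.items.foldl (fun nd p =>
        row.foldl (fun nd x =>
          nd.insert ((Int.gcd p.1 x : Int))
            (PySem.Int.mod (nd.getD ((Int.gcd p.1 x : Int)) 0 + p.2) 1000000007)) nd)
      PySem.Dict.empty)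
    (PySem.Dict.ofList [((0 : Int), (1 : Int))]) with hfinal
  have hpick : pvS final (pvE []) = if 1 ∈ final.keys then final.getD 1 0 else 0 := by
    unfold pvS
    rw [← pvSum_indicator final.keys hnd (fun j => final.getD j 0)]
    have hmapeq : final.keys.map (fun j => pvE [] j * final.getD j 0)
        = final.keys.map (fun j => (if j = 1 then 1 else 0) * final.getD j 0) :=
      List.map_congr_left (fun j _ => by
        show pvE [] j * final.getD j 0 = (if j = 1 then 1 else 0) * final.getD j 0
        rw [pvE])
    rw [hmapeq]
  have hgetD : final.getD 1 0 = pvS final (pvE []) := by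
    rw [hpick]
    by_cases h1 : (1 : Int) ∈ final.keys
    · simp [h1]
    · have hcf : final.contains 1 = false := by
        cases hcc : final.contains 1 with
        | false => rfl
        | true => exact absurd ((PySem.Dict.contains_iff_mem_keys final 1).mp hcc) h1
      simp [h1, PySem.Dict.getD_of_not_contains final 0 hcf]
  have hinit : pvS (PySem.Dict.ofList [((0 : Int), (1 : Int))]) (pvE mat) = pvE mat 0 := by
    have hr : pvS (PySem.Dict.ofList [((0 : Int), (1 : Int))]) (pvE mat)
        = pvE mat 0 * 1 + 0 := rfl
    rw [hr]; ring
  rw [pvMod_eq, hgetD, ← hinit]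
  exact hmod

-- ===== VERDICT (by name: the statement is the Claim_ definition above) =====
theorem countCoprime_spec : Claim_equal_countCoprime := by
  intro mat _
  show countCoprime mat = countCoprime_alt mat
  rw [pvCountCoprime_eq, pvAlt_eq, pvE_reverse]
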